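-- pv_equiv track=rewrite | github.com/zionnode/front-web | deploy.py | group_domains
-- ===== SOURCE A (Python) =====
-- def group_domains(domains):
--     # apex -> list(names)
--     groups = {}
--     present = set(domains)
--
--     for d in domains:
--         apex = d[4:] if d.startswith("www.") else d
--         groups.setdefault(apex, [])
--     for apex in list(groups.keys()):
--         names = []
--         if apex in present:
--             names.append(apex)
--         www = f"www.{apex}"
--         if www in present:
--             names.append(www)
--         groups[apex] = names
--
--     # stable order
--     return [(apex, groups[apex]) for apex in sorted(groups.keys())]
-- ===== SOURCE B (Python) =====
-- def group_domains(domains):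
--     # scatter pass: route every present name into its group's slot,
--     # instead of probing candidate names in a present-set per group
--     slots = {}
--     for d in domains:
--         apex = d[4:] if d.startswith("www.") else d
--         slots.setdefault(apex, [None, None])
--     for n in domains:
--         if n in slots:
--             slots[n][0] = n
--         if n.startswith("www."):
--             slots[n[4:]][1] = n
--     return [(a, [x for x in slots[a] if x is not None])
--             for a in sorted(slots)]
-- ===== Notes on version B (the rewrite author's own statement) =====
-- stated objective: alternative
-- what changed: B inverts A's gather into a scatter: A probes, for every apex key, the two candidate names (apex and www.apex) in a set of all domains; B keeps no present-set at all and instead routes each domain name into its group's [bare, www] slot pair in one pass, then reads the slots off in sorted key order.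
import Mathlib
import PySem

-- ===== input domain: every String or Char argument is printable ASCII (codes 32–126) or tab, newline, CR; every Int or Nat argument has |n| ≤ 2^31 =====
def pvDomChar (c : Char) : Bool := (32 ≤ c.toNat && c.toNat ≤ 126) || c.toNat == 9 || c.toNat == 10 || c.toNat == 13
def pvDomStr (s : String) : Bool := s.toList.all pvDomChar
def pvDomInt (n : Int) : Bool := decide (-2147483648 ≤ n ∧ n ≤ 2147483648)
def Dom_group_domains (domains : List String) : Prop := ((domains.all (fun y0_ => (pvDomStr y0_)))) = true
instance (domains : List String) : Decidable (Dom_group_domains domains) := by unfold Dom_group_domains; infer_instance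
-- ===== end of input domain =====

-- B inverts A's gather into a scatter: instead of probing the two candidate names of
-- every apex in a present-set, B routes each domain name into its group's bare/www slot
-- (objective: alternative, same cost).


-- ===== PORT A =====
def group_domains (domains : List String) : List (String × List String) :=
  let groups : PySem.Dict String (List String) := PySem.Dict.empty
  let present : PySem.Set String := PySem.Set.ofList domains
  let groups := domains.foldl (fun g d =>
      let apex := if PySem.Str.startswith d "www." then PySem.Str.slice d (some 4) none else d
      g.setdefault apex []) groups
  let groups := groups.keys.foldl (fun g apex =>
      let names : List String := []
      let names := if present.contains apex then names ++ [apex] else names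
      let www := "www." ++ apex
      let names := if present.contains www then names ++ [www] else names
      g.insert apex names) groups
  (PySem.List.sorted groups.keys (fun x => x) false).map (fun apex => (apex, groups.getD apex []))

-- ===== PORT B =====
def group_domains_alt (domains : List String) : List (String × List String) :=
  let slots : PySem.Dict String (Option String × Option String) :=
    domains.foldl (fun s d =>
      let apex := if PySem.Str.startswith d "www." then PySem.Str.slice d (some 4) none else d
      s.setdefault apex (none, none)) PySem.Dict.empty
  let slots := domains.foldl (fun s n =>
      let s := if s.contains n then s.modify n (none, none) (fun p => (some n, p.2)) else s
      if PySem.Str.startswith n "www." then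
        s.modify (PySem.Str.slice n (some 4) none) (none, none) (fun p => (p.1, some n))
      else s) slots
  (PySem.List.sorted slots.keys (fun x => x) false).map (fun a =>
    (a, [(slots.getD a (none, none)).1, (slots.getD a (none, none)).2].filterMap id))

-- ===== PRECONDITION & SPEC =====
def Spec_group_domains (domains : List String) (out : List (String × List String)) : Prop := out = group_domains_alt domains
instance (domains : List String) (out : List (String × List String)) : Decidable (Spec_group_domains domains out) := by unfold Spec_group_domains; infer_instance

-- ===== CLAIM (what is proved, stated in full; the proofs are below) =====
def Claim_equal_group_domains : Prop := ∀ (domains : List String), Dom_group_domains domains → Spec_group_domains domains (group_domains domains)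

-- ===== LEMMAS AND PROOFS =====

-- the shared apex map
def pvApex (d : String) : String :=
  if PySem.Str.startswith d "www." then PySem.Str.slice d (some 4) none else d

-- ---- string facts about the "www." prefix ----
theorem pv_startswith_www (a : String) : PySem.Str.startswith ("www." ++ a) "www." = true := by
  simp [PySem.Str.startswith, PySem.Chars.startswith]

theorem pv_slice_www (a : String) : PySem.Str.slice ("www." ++ a) (some 4) none = a := by
  apply String.toList_inj.mp
  rw [PySem.Str.toList_slice, PySem.Chars.slice_eq_listSlice]
  rw [show ((4:Int)) = ((4:Nat):Int) from rfl, PySem.List.slice_from_natCast]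
  rw [String.toList_append, show ("www." : String).toList = ['w','w','w','.'] from rfl]
  simp

theorem pv_www_decomp (n : String) (h : PySem.Str.startswith n "www." = true) :
    "www." ++ PySem.Str.slice n (some 4) none = n := by
  apply String.toList_inj.mp
  simp only [PySem.Str.startswith, PySem.Chars.startswith] at h
  rw [String.toList_append, PySem.Str.toList_slice, PySem.Chars.slice_eq_listSlice]
  rw [show ((4:Int)) = ((4:Nat):Int) from rfl, PySem.List.slice_from_natCast]
  obtain ⟨t, ht⟩ := List.isPrefixOf_iff_prefix.mp h
  rw [← ht, show ("www." : String).toList = ['w','w','w','.'] from rfl]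
  simp

-- n = "www." ++ a  ↔  n starts with "www." and its tail is a
theorem pv_www_iff (n a : String) :
    n = "www." ++ a ↔ (PySem.Str.startswith n "www." = true ∧ PySem.Str.slice n (some 4) none = a) := by
  constructor
  · rintro rfl; exact ⟨pv_startswith_www a, pv_slice_www a⟩
  · rintro ⟨h1, h2⟩; rw [← h2]; exact (pv_www_decomp n h1).symm

-- ---- generic dict lemmas (reused for both ports) ----
theorem pv_any_fst_eq {ν : Type} (l : List (String × ν)) (k : String) :
    (l.any fun p => p.1 == k) = List.elem k (l.map Prod.fst) := by
  have h : (l.any fun p => p.1 == k) = (l.map Prod.fst).any fun y => y == k := by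
    rw [List.any_map]; rfl
  rw [h, List.any_beq', List.elem_eq_contains]

theorem pv_dict_contains_keys {ν : Type} (d : PySem.Dict String ν) (k : String) :
    d.contains k = PySem.Set.contains d.keys k := by
  show (d.items.any fun p => p.1 == k) = List.elem k (d.items.map Prod.fst)
  exact pv_any_fst_eq d.items k

theorem pv_keys_setdefault_add {ν : Type} (d : PySem.Dict String ν) (k : String) (v : ν) :
    (d.setdefault k v).keys = PySem.Set.add d.keys k := by
  rw [PySem.Dict.keys_setdefault, PySem.Set.add, ← pv_dict_contains_keys]

theorem pv_keys_foldl_setdefault {ν : Type} (fx : String → String) (v : ν) :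
    ∀ (l : List String) (d : PySem.Dict String ν),
      (l.foldl (fun g x => g.setdefault (fx x) v) d).keys
        = PySem.Set.update d.keys (l.map fx) := by
  intro l
  induction l with
  | nil => intro d; simp [PySem.Set.update]
  | cons x t ih =>
      intro d
      simp only [List.foldl_cons, List.map_cons, PySem.Set.update, ih,
        pv_keys_setdefault_add]

theorem pv_set_add_of_mem (s : PySem.Set String) (x : String) (hx : x ∈ s) :
    PySem.Set.add s x = s := by
  simp [PySem.Set.add, PySem.Set.contains, hx]

theorem pv_set_update_of_subset :
    ∀ (l : List String) (s : PySem.Set String), (∀ x ∈ l, x ∈ s) → PySem.Set.update s l = s := by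
  intro l
  induction l with
  | nil => intro s _; rfl
  | cons x t ih =>
      intro s h
      have hx : x ∈ s := h x (by simp)
      show PySem.Set.update (PySem.Set.add s x) t = s
      rw [pv_set_add_of_mem s x hx]
      exact ih s (fun y hy => h y (by simp [hy]))

theorem pv_get?_foldl_insert_not_mem {ν : Type} (F : String → ν) :
    ∀ (l : List String) (g : PySem.Dict String ν) (k : String), k ∉ l →
      (l.foldl (fun g x => g.insert x (F x)) g).get? k = g.get? k := by
  intro l
  induction l with
  | nil => intro g k _; rfl
  | cons x t ih =>
      intro g k hk
      simp only [List.foldl_cons]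
      rw [ih _ k (fun h => hk (List.mem_cons_of_mem _ h)),
        PySem.Dict.get?_insert_of_ne _ _ (fun h : k = x => hk (List.mem_cons.mpr (Or.inl h)))]

theorem pv_get?_foldl_insert_mem {ν : Type} (F : String → ν) :
    ∀ (l : List String) (g : PySem.Dict String ν) (k : String), l.Nodup → k ∈ l →
      (l.foldl (fun g x => g.insert x (F x)) g).get? k = some (F k) := by
  intro l
  induction l with
  | nil => intro g k _ hk; cases hk
  | cons x t ih =>
      intro g k hnd hk
      simp only [List.foldl_cons]
      rcases List.mem_cons.mp hk with h | h
      · subst h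
        rw [pv_get?_foldl_insert_not_mem F t _ k (List.nodup_cons.mp hnd).1,
          PySem.Dict.get?_insert_self]
      · exact ih _ k (List.nodup_cons.mp hnd).2 h

-- A's whole two-pass dict pipeline, for a generic apex map fx and names map N.
theorem pv_main (domains : List String) (fx : String → String) (N : String → List String) :
    (PySem.List.sorted
        ((List.foldl (fun g apex => g.insert apex (N apex))
            (List.foldl (fun g d => g.setdefault (fx d) ([] : List String)) PySem.Dict.empty domains)
            (List.foldl (fun g d => g.setdefault (fx d) ([] : List String)) PySem.Dict.empty domains).keys).keys)
        (fun x => x) false).map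
      (fun apex => (apex,
        (List.foldl (fun g apex => g.insert apex (N apex))
            (List.foldl (fun g d => g.setdefault (fx d) ([] : List String)) PySem.Dict.empty domains)
            (List.foldl (fun g d => g.setdefault (fx d) ([] : List String)) PySem.Dict.empty domains).keys).getD apex []))
    = (PySem.List.sorted (PySem.Set.ofList (domains.map fx)) (fun x => x) false).map
        (fun a => (a, N a)) := by
  have hK1 : (List.foldl (fun g d => g.setdefault (fx d) ([] : List String)) PySem.Dict.empty domains).keys
      = PySem.Set.ofList (domains.map fx) := by
    rw [pv_keys_foldl_setdefault, PySem.Set.ofList_eq_foldl]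
    rfl
  have hKnd : (PySem.Set.ofList (domains.map fx)).Nodup := PySem.Set.nodup_ofList _
  rw [hK1]
  have hK2 : (List.foldl (fun g apex => g.insert apex (N apex))
      (List.foldl (fun g d => g.setdefault (fx d) ([] : List String)) PySem.Dict.empty domains)
      (PySem.Set.ofList (domains.map fx))).keys = PySem.Set.ofList (domains.map fx) := by
    rw [PySem.Dict.keys_foldl_insert, hK1,
      pv_set_update_of_subset _ _ (fun x hx => hx)]
  rw [hK2]
  apply List.map_congr_left
  intro a ha
  have haK : a ∈ PySem.Set.ofList (domains.map fx) := (PySem.List.mem_sorted _ _ _ _).mp ha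
  have hget : (List.foldl (fun g apex => g.insert apex (N apex))
      (List.foldl (fun g d => g.setdefault (fx d) ([] : List String)) PySem.Dict.empty domains)
      (PySem.Set.ofList (domains.map fx))).get? a = some (N a) :=
    pv_get?_foldl_insert_mem N _ _ a hKnd haK
  simp [PySem.Dict.getD, hget]

-- ---- B-side lemmas ----

-- abbreviation for B's second-pass step
def pvStep (s : PySem.Dict String (Option String × Option String)) (n : String) :
    PySem.Dict String (Option String × Option String) :=
  let s := if s.contains n then s.modify n (none, none) (fun p => (some n, p.2)) else s
  if PySem.Str.startswith n "www." then
    s.modify (PySem.Str.slice n (some 4) none) (none, none) (fun p => (p.1, some n))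
  else s

theorem pv_keys_pvStep (s : PySem.Dict String (Option String × Option String)) (n : String)
    (h : PySem.Str.startswith n "www." = true → s.contains (PySem.Str.slice n (some 4) none) = true) :
    (pvStep s n).keys = s.keys := by
  unfold pvStep
  split_ifs with h1 h2 h2
  · rw [PySem.Dict.keys_modify, PySem.Dict.keys_insert_of_contains _ _
        (by rw [PySem.Dict.contains_modify, h h2]; simp),
      PySem.Dict.keys_modify, PySem.Dict.keys_insert_of_contains _ _ h1]
  · rw [PySem.Dict.keys_modify, PySem.Dict.keys_insert_of_contains _ _ h1]
  · rw [PySem.Dict.keys_modify, PySem.Dict.keys_insert_of_contains _ _ (h h2)]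
  · rfl

theorem pv_contains_pvStep (s : PySem.Dict String (Option String × Option String)) (n k : String)
    (h : PySem.Str.startswith n "www." = true → s.contains (PySem.Str.slice n (some 4) none) = true) :
    (pvStep s n).contains k = s.contains k := by
  rw [PySem.Dict.contains_eq_decide_mem_keys, PySem.Dict.contains_eq_decide_mem_keys,
    pv_keys_pvStep s n h]

theorem pv_keys_foldl_pvStep :
    ∀ (l : List String) (s : PySem.Dict String (Option String × Option String)),
      (∀ n ∈ l, s.contains (pvApex n) = true) →
      (l.foldl pvStep s).keys = s.keys := by
  intro l
  induction l with
  | nil => intro s _; rfl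
  | cons n t ih =>
      intro s h
      have hn : PySem.Str.startswith n "www." = true → s.contains (PySem.Str.slice n (some 4) none) = true := by
        intro hw
        have := h n (by simp)
        rwa [pvApex, if_pos hw] at this
      rw [List.foldl_cons, ih (pvStep s n) ?_, pv_keys_pvStep s n hn]
      intro m hm
      rw [pv_contains_pvStep s n _ hn]
      exact h m (by simp [hm])

-- one step's effect on the slot of a contained key a
theorem pv_getD_pvStep (s : PySem.Dict String (Option String × Option String)) (n a : String)
    (ha : s.contains a = true) :
    (pvStep s n).getD a (none, none)
      = ((if n = a then some a else (s.getD a (none, none)).1),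
         (if n = "www." ++ a then some n else (s.getD a (none, none)).2)) := by
  unfold pvStep
  have hslot1 : (if s.contains n then s.modify n (none, none) (fun p => (some n, p.2)) else s).getD a (none, none)
      = ((if n = a then some a else (s.getD a (none, none)).1), (s.getD a (none, none)).2) := by
    by_cases hn : n = a
    · subst hn
      rw [if_pos ha, PySem.Dict.getD_modify]
      simp
    · split_ifs with hc
      · rw [PySem.Dict.getD_modify, if_neg (fun h => hn h.symm)]
      · simp
  by_cases hw : PySem.Str.startswith n "www." = true
  · rw [if_pos hw, PySem.Dict.getD_modify]
    by_cases heq : n = "www." ++ a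
    · have hsl : PySem.Str.slice n (some 4) none = a := ((pv_www_iff n a).mp heq).2
      rw [if_pos hsl.symm, hsl, hslot1]
      simp [heq]
    · have hsl : ¬ (a = PySem.Str.slice n (some 4) none) := by
        intro h
        exact heq ((pv_www_iff n a).mpr ⟨hw, h.symm⟩)
      rw [if_neg hsl, hslot1, if_neg heq]
  · rw [if_neg hw, hslot1]
    have heq : n ≠ "www." ++ a := fun h => hw ((pv_www_iff n a).mp h).1
    rw [if_neg heq]

-- the whole second pass: final slots of a contained key a
theorem pv_getD_foldl_pvStep :
    ∀ (l : List String) (s : PySem.Dict String (Option String × Option String)) (a : String),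
      (∀ n ∈ l, s.contains (pvApex n) = true) →
      s.contains a = true →
      (l.foldl pvStep s).getD a (none, none)
        = ((if a ∈ l then some a else (s.getD a (none, none)).1),
           (if ("www." ++ a) ∈ l then some ("www." ++ a) else (s.getD a (none, none)).2)) := by
  intro l
  induction l with
  | nil => intro s a _ _; simp
  | cons n t ih =>
      intro s a hK ha
      have hn : PySem.Str.startswith n "www." = true → s.contains (PySem.Str.slice n (some 4) none) = true := by
        intro hw
        have := hK n (by simp)
        rwa [pvApex, if_pos hw] at this
      rw [List.foldl_cons,
        ih (pvStep s n) a (fun m hm => by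
          rw [pv_contains_pvStep s n _ hn]; exact hK m (by simp [hm]))
          (by rw [pv_contains_pvStep s n _ hn]; exact ha),
        pv_getD_pvStep s n a ha]
      refine Prod.ext ?_ ?_
      · simp only [List.mem_cons]
        by_cases h1 : a ∈ t <;> by_cases h2 : n = a <;> simp [h1, h2, eq_comm]
      · simp only [List.mem_cons]
        by_cases h1 : ("www." ++ a) ∈ t <;> by_cases h2 : n = "www." ++ a <;>
          simp [h1, h2, eq_comm]

-- after the setdefault pass from empty, every slot reads (none, none)
theorem pv_get?_foldl_setdefault_inv :
    ∀ (l : List String) (d : PySem.Dict String (Option String × Option String)),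
      (∀ k, d.get? k = none ∨ d.get? k = some (none, none)) →
      ∀ k, (l.foldl (fun g x => g.setdefault (pvApex x) (none, none)) d).get? k = none ∨
           (l.foldl (fun g x => g.setdefault (pvApex x) (none, none)) d).get? k = some (none, none) := by
  intro l
  induction l with
  | nil => intro d h k; exact h k
  | cons x t ih =>
      intro d h k
      rw [List.foldl_cons]
      refine ih _ ?_ k
      intro k'
      by_cases hk : k' = pvApex x
      · subst hk
        rw [PySem.Dict.get?_setdefault_self]
        rcases h (pvApex x) with h' | h' <;> simp [h']
      · rw [PySem.Dict.get?_setdefault_of_ne _ _ hk]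
        exact h k'

theorem pv_getD_slots0 (domains : List String) (a : String) :
    (List.foldl (fun g x => g.setdefault (pvApex x) ((none : Option String), (none : Option String)))
        PySem.Dict.empty domains).getD a (none, none) = (none, none) := by
  have h := pv_get?_foldl_setdefault_inv domains PySem.Dict.empty (fun k => Or.inl (by simp)) a
  rcases h with h | h <;> simp [PySem.Dict.getD, h]

-- Set.contains on ofList is plain membership
theorem pv_contains_ofList (xs : List String) (x : String) :
    PySem.Set.contains (PySem.Set.ofList xs) x = decide (x ∈ xs) := by
  by_cases h : x ∈ xs
  · have : x ∈ PySem.Set.ofList xs := (PySem.Set.mem_ofList xs x).mpr h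
    simp [PySem.Set.contains, this, h]
  · have : x ∉ PySem.Set.ofList xs := fun hc => h ((PySem.Set.mem_ofList xs x).mp hc)
    simp [PySem.Set.contains, this, h]

-- B's whole pipeline
theorem pv_alt_eq (domains : List String) :
    group_domains_alt domains
      = (PySem.List.sorted (PySem.Set.ofList (domains.map pvApex)) (fun x => x) false).map
          (fun a => (a, [(if a ∈ domains then some a else none),
                         (if ("www." ++ a) ∈ domains then some ("www." ++ a) else none)].filterMap id)) := by
  unfold group_domains_alt
  simp only []
  have hs : (fun (s : PySem.Dict String (Option String × Option String)) (n : String) =>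
      let s' := if s.contains n then s.modify n (none, none) (fun p => (some n, p.2)) else s
      if PySem.Str.startswith n "www." then
        s'.modify (PySem.Str.slice n (some 4) none) (none, none) (fun p => (p.1, some n))
      else s') = pvStep := rfl
  have h0 : (fun (s : PySem.Dict String (Option String × Option String)) (d : String) =>
      let apex := if PySem.Str.startswith d "www." then PySem.Str.slice d (some 4) none else d
      s.setdefault apex (none, none))
      = (fun s d => s.setdefault (pvApex d) (none, none)) := rfl
  rw [hs, h0]
  have hK0 : (List.foldl (fun s d => s.setdefault (pvApex d) ((none : Option String), (none : Option String)))
      PySem.Dict.empty domains).keys = PySem.Set.ofList (domains.map pvApex) := by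
    rw [pv_keys_foldl_setdefault, PySem.Set.ofList_eq_foldl]
    rfl
  have hall : ∀ n ∈ domains,
      (List.foldl (fun s d => s.setdefault (pvApex d) ((none : Option String), (none : Option String)))
        PySem.Dict.empty domains).contains (pvApex n) = true := by
    intro n hn
    have hm : pvApex n ∈ List.map pvApex domains := List.mem_map_of_mem hn
    rw [PySem.Dict.contains_eq_decide_mem_keys, hK0]
    simpa using (PySem.Set.mem_ofList _ _).mpr hm
  rw [pv_keys_foldl_pvStep domains _ hall, hK0]
  apply List.map_congr_left
  intro a ha
  have haK : a ∈ PySem.Set.ofList (domains.map pvApex) := (PySem.List.mem_sorted _ _ _ _).mp ha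
  have hc : (List.foldl (fun s d => s.setdefault (pvApex d) ((none : Option String), (none : Option String)))
      PySem.Dict.empty domains).contains a = true := by
    rw [PySem.Dict.contains_eq_decide_mem_keys, hK0]
    simpa using haK
  rw [pv_getD_foldl_pvStep domains _ a hall hc, pv_getD_slots0 domains a]

-- ===== VERDICT (by name: the statement is the Claim_ definition above) =====
theorem group_domains_spec : Claim_equal_group_domains := by
  intro domains _
  unfold Spec_group_domains
  rw [pv_alt_eq]
  unfold group_domains
  simp only []
  refine Eq.trans (pv_main domains pvApex _) ?_
  apply List.map_congr_left
  intro a _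
  refine congrArg (Prod.mk a) ?_
  rw [pv_contains_ofList, pv_contains_ofList]
  by_cases h1 : a ∈ domains <;> by_cases h2 : ("www." ++ a) ∈ domains <;>
    simp [h1, h2, List.filterMap]
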